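-- pv_equiv track=rewrite | github.com/bwjubrother/Algorithms | Tests/2020Line.py | solution
-- ===== SOURCE A (Python) =====
-- def solution(dataSource, tags):
--     answer = []
--     numDict = {}
--     for data in dataSource:
--         for tag in tags:
--             if tag in data[1:]:
--                 if data[0] in numDict.keys():
--                     numDict[data[0]] += 1
--                 else:
--                     numDict[data[0]] = 1
--     sortDict = sorted(numDict.items(), key=lambda x: x[1], reverse=True)
--     for i in sortDict:
--         answer.append(i[0])
--     return answer
-- ===== SOURCE B (Python) =====
-- def solution(dataSource, tags):
--     # same counting pass as the task asks: id -> number of matching tags (zero-match ids excluded)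
--     numDict = {}
--     for data in dataSource:
--         c = sum(1 for tag in tags if tag in data[1:])
--         if c != 0:
--             numDict[data[0]] = numDict.get(data[0], 0) + c
--     if not numDict:
--         return []
--     # counting/bucket sort instead of a comparison sort: emit counts from the maximum down to 1,
--     # keeping insertion order inside each count (= sorted(..., reverse=True)'s stable order)
--     m = max(numDict.values())
--     answer = []
--     for k in range(m, 0, -1):
--         for name, cnt in numDict.items():
--             if cnt == k:
--                 answer.append(name)
--     return answer
-- ===== Notes on version B (the rewrite author's own statement) =====
-- stated objective: alternative
-- what changed: B keeps A's in-order counting pass (adding each row's whole tag count in one dict update instead of one update per matching tag) but replaces sorted(..., key=count, reverse=True) by a counting-sort emission: it walks counts from the maximum down to 1 and outputs ids in dict insertion order within each count, reproducing the stable descending order without a comparison sort.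
import Mathlib
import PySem

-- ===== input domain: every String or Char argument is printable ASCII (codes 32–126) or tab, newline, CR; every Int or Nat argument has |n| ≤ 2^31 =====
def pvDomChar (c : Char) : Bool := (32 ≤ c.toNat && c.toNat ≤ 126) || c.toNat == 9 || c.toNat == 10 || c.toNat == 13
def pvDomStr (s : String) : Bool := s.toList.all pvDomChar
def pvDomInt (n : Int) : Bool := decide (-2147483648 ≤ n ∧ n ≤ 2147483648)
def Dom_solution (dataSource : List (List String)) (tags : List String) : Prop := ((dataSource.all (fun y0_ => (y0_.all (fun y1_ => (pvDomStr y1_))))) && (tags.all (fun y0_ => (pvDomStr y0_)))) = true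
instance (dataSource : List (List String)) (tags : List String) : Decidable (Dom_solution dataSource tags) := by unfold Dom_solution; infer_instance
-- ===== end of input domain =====

-- B replaces A's comparison sort (sorted by count, reverse=True) with a counting/bucket emission:
-- counts are emitted from the maximum down to 1, scanning the dict's items in insertion order per
-- count, which reproduces the stable descending order; the counting pass adds each row's tag count
-- in one insert instead of one dict update per matching tag.  Objective: alternative algorithm.


-- ===== PORT A =====
def solution (dataSource : List (List String)) (tags : List String) : List String :=
  let numDict : PySem.Dict String Int :=
    dataSource.foldl (fun numDict data =>
      tags.foldl (fun numDict tag =>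
        if (PySem.List.slice data (some 1) none).contains tag then
          if numDict.contains (PySem.List.pyGetD data 0 "") then
            numDict.insert (PySem.List.pyGetD data 0 "") (numDict.getD (PySem.List.pyGetD data 0 "") 0 + 1)
          else
            numDict.insert (PySem.List.pyGetD data 0 "") 1
        else numDict) numDict) PySem.Dict.empty
  let sortDict := PySem.List.sorted numDict.items (fun x => x.2) true
  sortDict.foldl (fun answer i => answer ++ [i.1]) []

-- ===== PORT B =====
def solution_alt (dataSource : List (List String)) (tags : List String) : List String :=
  let numDict : PySem.Dict String Int :=
    dataSource.foldl (fun numDict data =>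
      let c : Int := tags.foldl (fun s tag => if (PySem.List.slice data (some 1) none).contains tag then s + 1 else s) 0
      if c ≠ 0 then
        numDict.insert (PySem.List.pyGetD data 0 "") (numDict.getD (PySem.List.pyGetD data 0 "") 0 + c)
      else numDict) PySem.Dict.empty
  if numDict.items.isEmpty then []
  else
    let m : Int := (PySem.List.max? numDict.values (fun v => v)).getD 0
    (PySem.List.pyRange m 0 (-1)).foldl (fun answer k =>
      numDict.items.foldl (fun answer p => if p.2 == k then answer ++ [p.1] else answer) answer) []

-- ===== PRECONDITION & SPEC =====
def Spec_solution (dataSource : List (List String)) (tags : List String) (out : List String) : Prop := out = solution_alt dataSource tags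
instance (dataSource : List (List String)) (tags : List String) (out : List String) : Decidable (Spec_solution dataSource tags out) := by unfold Spec_solution; infer_instance

-- ===== CLAIM (what is proved, stated in full; the proofs are below) =====
def Claim_equal_solution : Prop := ∀ (dataSource : List (List String)) (tags : List String), Dom_solution dataSource tags → Spec_solution dataSource tags (solution dataSource tags)

-- ===== LEMMAS AND PROOFS =====

-- A's per-tag dict update, with the contains test resolved, is a uniform getD-based increment.
theorem pv_rowA_step (x : String) (d : PySem.Dict String Int) :
    (if d.contains x then d.insert x (d.getD x 0 + 1) else d.insert x 1)
      = d.insert x (d.getD x 0 + 1) := by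
  by_cases hc : d.contains x
  · simp [hc]
  · rw [if_neg (by simp [hc]), PySem.Dict.getD_of_not_contains d 0 (by simp [hc])]
    norm_num

-- the uniform per-tag increment loop performs one combined insert (or nothing when no tag matches)
theorem pv_row_count (p : String → Bool) (x : String) (tags : List String) (d : PySem.Dict String Int) :
    tags.foldl (fun d tag => if p tag then d.insert x (d.getD x 0 + 1) else d) d
      = if (tags.countP p : Int) ≠ 0 then d.insert x (d.getD x 0 + (tags.countP p : Int)) else d := by
  induction tags generalizing d with
  | nil => simp
  | cons t ts ih =>
    rw [List.foldl_cons]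
    by_cases h : p t
    · rw [if_pos h, ih]
      have hcc : (t::ts).countP p = ts.countP p + 1 := by simp [h]
      have hne : ((ts.countP p + 1 : Nat) : Int) ≠ 0 := by exact_mod_cast Nat.succ_ne_zero (ts.countP p)
      rw [hcc, if_pos hne]
      by_cases h2 : ((ts.countP p : Int) ≠ 0)
      · rw [if_pos h2, PySem.Dict.getD_insert_self, PySem.Dict.insert_insert_self]
        congr 1
        push_cast
        ring
      · rw [if_neg h2]
        have h0 : ts.countP p = 0 := by exact_mod_cast not_not.mp h2
        congr 1
        rw [h0]
        norm_num
    · rw [if_neg h, ih]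
      simp [h]

-- the two per-row dict updates agree
theorem pv_dict_eq (dataSource : List (List String)) (tags : List String) :
    dataSource.foldl (fun numDict data =>
      tags.foldl (fun numDict tag =>
        if (PySem.List.slice data (some 1) none).contains tag then
          if numDict.contains (PySem.List.pyGetD data 0 "") then
            numDict.insert (PySem.List.pyGetD data 0 "") (numDict.getD (PySem.List.pyGetD data 0 "") 0 + 1)
          else
            numDict.insert (PySem.List.pyGetD data 0 "") 1
        else numDict) numDict) (PySem.Dict.empty : PySem.Dict String Int)
    = dataSource.foldl (fun numDict data =>
      let c : Int := tags.foldl (fun s tag => if (PySem.List.slice data (some 1) none).contains tag then s + 1 else s) 0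
      if c ≠ 0 then
        numDict.insert (PySem.List.pyGetD data 0 "") (numDict.getD (PySem.List.pyGetD data 0 "") 0 + c)
      else numDict) PySem.Dict.empty := by
  congr 1
  funext d data
  have hA : (fun (d : PySem.Dict String Int) tag =>
      if (PySem.List.slice data (some 1) none).contains tag then
        if d.contains (PySem.List.pyGetD data 0 "") then
          d.insert (PySem.List.pyGetD data 0 "") (d.getD (PySem.List.pyGetD data 0 "") 0 + 1)
        else d.insert (PySem.List.pyGetD data 0 "") 1
      else d)
      = (fun (d : PySem.Dict String Int) tag =>
        if (PySem.List.slice data (some 1) none).contains tag then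
          d.insert (PySem.List.pyGetD data 0 "") (d.getD (PySem.List.pyGetD data 0 "") 0 + 1)
        else d) := by
    funext d tag
    by_cases h : (PySem.List.slice data (some 1) none).contains tag
    · rw [if_pos h, if_pos h, pv_rowA_step]
    · rw [if_neg h, if_neg h]
  rw [hA, pv_row_count (fun t => (PySem.List.slice data (some 1) none).contains t),
      PySem.List.foldl_count_if (fun t => (PySem.List.slice data (some 1) none).contains t)]
  simp

-- every value stored by B's counting loop is at least 1
theorem pv_values_pos (dataSource : List (List String)) (tags : List String)
    (d : PySem.Dict String Int) (h : ∀ v ∈ d.values, 1 ≤ v) :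
    ∀ v ∈ (dataSource.foldl (fun numDict data =>
      let c : Int := tags.foldl (fun s tag => if (PySem.List.slice data (some 1) none).contains tag then s + 1 else s) 0
      if c ≠ 0 then
        numDict.insert (PySem.List.pyGetD data 0 "") (numDict.getD (PySem.List.pyGetD data 0 "") 0 + c)
      else numDict) d).values, 1 ≤ v := by
  induction dataSource generalizing d with
  | nil => simpa using h
  | cons data rest ih =>
    rw [List.foldl_cons]
    apply ih
    simp only
    rw [PySem.List.foldl_count_if (fun t => (PySem.List.slice data (some 1) none).contains t)]
    simp only [zero_add]
    by_cases hc : ((List.countP (fun t => (PySem.List.slice data (some 1) none).contains t) tags : Int) ≠ 0)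
    · rw [if_pos hc]
      intro v hv
      rcases PySem.Dict.mem_values_insert _ _ _ _ hv with h1 | h2
      · subst h1
        have hg : 0 ≤ d.getD (PySem.List.pyGetD data 0 "") 0 := by
          by_cases hk : d.contains (PySem.List.pyGetD data 0 "")
          · rw [PySem.Dict.contains_eq_isSome_get?] at hk
            rcases Option.isSome_iff_exists.mp hk with ⟨w, hw⟩
            have hwv : w ∈ d.values := by
              have h1 := PySem.Dict.mem_items_of_get?_eq_some d hw
              have h2 := List.mem_map_of_mem (f := fun p => p.2) h1
              simpa [PySem.Dict.values] using h2
            have := h w hwv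
            rw [PySem.Dict.getD_eq_get?_getD, hw]
            simpa using by omega
          · rw [PySem.Dict.getD_of_not_contains d 0 (by simpa using hk)]
        omega
      · exact h v h2
    · rw [if_neg hc]; exact h
  
-- insertBy passes over a block it does not insert before
theorem pv_insertBy_append {α : Type} (bf : α → α → Bool) (x : α) (block rest : List α)
    (h : ∀ y ∈ block, bf x y = false) :
    PySem.List.insertBy bf x (block ++ rest) = block ++ PySem.List.insertBy bf x rest := by
  induction block with
  | nil => simp
  | cons y ys ih =>
    simp only [List.cons_append, PySem.List.insertBy, h y (by simp)]
    simp only [Bool.false_eq_true, if_false, List.cons.injEq, true_and]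
    exact ih (fun z hz => h z (by simp [hz]))

-- insertBy puts x in front when it goes before everything
theorem pv_insertBy_front {α : Type} (bf : α → α → Bool) (x : α) (ys : List α)
    (h : ∀ y ∈ ys, bf x y = true) :
    PySem.List.insertBy bf x ys = x :: ys := by
  cases ys with
  | nil => rfl
  | cons y t => simp [PySem.List.insertBy, h y (by simp)]

-- inserting one pair into the bucket concatenation appends it to the end of its own bucket
theorem pv_insert_buckets {α : Type} (x : α × Int) (ks : List Int) (l : List (α × Int))
    (hs : ks.Pairwise (· > ·)) (hx : x.2 ∈ ks) :
    PySem.List.insertBy (fun a b => decide (b.2 < a.2)) x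
        (ks.flatMap (fun k => l.filter (fun p => p.2 == k)))
      = ks.flatMap (fun k => (l ++ [x]).filter (fun p => p.2 == k)) := by
  induction ks with
  | nil => cases hx
  | cons k ks ih =>
    rcases List.pairwise_cons.mp hs with ⟨hk, hs'⟩
    simp only [List.flatMap_cons]
    by_cases hxk : x.2 = k
    · rw [pv_insertBy_append _ _ _ _ (by
        intro y hy
        have : y.2 = k := by simpa using (List.of_mem_filter hy)
        simp [this, hxk]),
        pv_insertBy_front _ _ _ (by
        intro y hy
        rcases List.mem_flatMap.mp hy with ⟨k', hk', hy'⟩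
        have h1 : y.2 = k' := by simpa using (List.of_mem_filter hy')
        have h2 : k' < k := hk k' hk'
        simp [h1, hxk]
        omega)]
      have hhead : (l ++ [x]).filter (fun p => p.2 == k) = l.filter (fun p => p.2 == k) ++ [x] := by
        rw [List.filter_append]
        simp [hxk]
      rw [hhead]
      have htail : (ks.flatMap (fun k => (l ++ [x]).filter (fun p => p.2 == k)))
          = ks.flatMap (fun k => l.filter (fun p => p.2 == k)) := by
        apply List.flatMap_congr
        intro k' hk'
        rw [List.filter_append]
        have : x.2 ≠ k' := by
          have := hk k' hk'
          omega
        simp [this]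
      rw [htail]
      simp
    · have hx' : x.2 ∈ ks := by
        rcases List.mem_cons.mp hx with h | h
        · exact absurd h hxk
        · exact h
      rw [pv_insertBy_append _ _ _ _ (by
        intro y hy
        have h1 : y.2 = k := by simpa using (List.of_mem_filter hy)
        have h2 : x.2 < k := by
          have := hk _ hx'
          omega
        simp [h1]
        omega)]
      rw [ih hs' hx']
      congr 1
      rw [List.filter_append]
      simp [hxk]

-- the stable reverse sort by the Int second component is the descending bucket concatenation
theorem pv_sorted_buckets {α : Type} (l : List (α × Int)) (ks : List Int)
    (hs : ks.Pairwise (· > ·)) (hl : ∀ p ∈ l, p.2 ∈ ks) :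
    PySem.List.sorted l (fun p => p.2) true = ks.flatMap (fun k => l.filter (fun p => p.2 == k)) := by
  rw [PySem.List.sorted_rev_eq_foldl_insertBy]
  induction l using List.reverseRecOn with
  | nil => simp
  | append_singleton l' x ih =>
    rw [List.foldl_append, List.foldl_cons, List.foldl_nil,
        ih (fun p hp => hl p (by simp [hp]))]
    exact pv_insert_buckets x ks l' hs (hl x (by simp))

-- ===== VERDICT (by name: the statement is the Claim_ definition above) =====
theorem solution_spec : Claim_equal_solution := by
  intro dataSource tags _dom
  unfold Spec_solution solution solution_alt
  dsimp only
  rw [pv_dict_eq]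
  set d := dataSource.foldl (fun numDict data =>
      let c : Int := tags.foldl (fun s tag => if (PySem.List.slice data (some 1) none).contains tag then s + 1 else s) 0
      if c ≠ 0 then
        numDict.insert (PySem.List.pyGetD data 0 "") (numDict.getD (PySem.List.pyGetD data 0 "") 0 + c)
      else numDict) (PySem.Dict.empty : PySem.Dict String Int) with hd
  by_cases he : d.items.isEmpty
  · rw [if_pos he]
    have : d.items = [] := by simpa [List.isEmpty_iff] using he
    rw [this]
    simp [PySem.List.sorted]
  · rw [if_neg he]
    have hitems : d.items ≠ [] := by simpa [List.isEmpty_iff] using he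
    have hvalues : d.values ≠ [] := by
      simp only [PySem.Dict.values]
      simpa using hitems
    obtain ⟨m, hm⟩ : ∃ m, PySem.List.max? d.values (fun v => v) = some m := by
      rcases hmax : PySem.List.max? d.values (fun v => v) with _ | m
      · exact absurd ((PySem.List.max?_eq_none_iff _ _).mp hmax) hvalues
      · exact ⟨m, rfl⟩
    rw [hm]
    simp only [Option.getD_some]
    have hpos : ∀ v ∈ d.values, 1 ≤ v := by
      rw [hd]
      exact pv_values_pos dataSource tags PySem.Dict.empty (by simp [PySem.Dict.values, PySem.Dict.empty])
    have hks : (PySem.List.pyRange m 0 (-1)).Pairwise (· > ·) := by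
      rw [PySem.List.pyRange_neg_one_eq_reverse]
      rw [List.pairwise_reverse]
      exact PySem.List.pairwise_lt_pyRange_one _ _
    have hmem : ∀ p ∈ d.items, p.2 ∈ PySem.List.pyRange m 0 (-1) := by
      intro p hp
      rw [PySem.List.mem_pyRange_neg_one]
      have hv : p.2 ∈ d.values := by
        simp only [PySem.Dict.values]
        exact List.mem_map_of_mem hp
      constructor
      · have := hpos _ hv; omega
      · simpa using PySem.List.max?_isMax hm _ hv
    rw [pv_sorted_buckets d.items _ hks hmem,
        PySem.List.foldl_append_singleton_eq_map (fun (i : String × Int) => i.1)]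
    have hinner : (fun (answer : List String) (k : Int) =>
        d.items.foldl (fun answer p => if p.2 == k then answer ++ [p.1] else answer) answer)
        = (fun answer k => answer ++ (d.items.filter (fun p => p.2 == k)).map (fun p => p.1)) := by
      funext answer k
      exact PySem.List.foldl_append_if (fun p => p.2 == k) (fun p => p.1) d.items answer
    rw [hinner, PySem.List.foldl_append_eq_flatMap]
    simp [List.map_flatMap]
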